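-- pv_equiv track=rewrite | github.com/Isqanderm/lore | lore/artifacts/repository_structure_models.py | get_top_level_files
-- ===== SOURCE A (Python) =====
-- def normalize_path(path: str) -> str:
--     p = path.strip()
--     if p.startswith("./"):
--         p = p[2:]
--     return p
--
-- def get_top_level_files(paths: list[str]) -> list[str]:
--     seen: set[str] = set()
--     result: list[str] = []
--     for p in paths:
--         n = normalize_path(p)
--         if not n or "/" in n:
--             continue
--         if n not in seen:
--             seen.add(n)
--             result.append(n)
--     return sorted(result)
-- ===== SOURCE B (Python) =====
-- def normalize_path(path: str) -> str:
--     p = path.strip()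
--     if p.startswith("./"):
--         p = p[2:]
--     return p
--
-- def get_top_level_files(paths: list[str]) -> list[str]:
--     names = [n for n in map(normalize_path, paths) if n and "/" not in n]
--     names.sort()
--     result: list[str] = []
--     for n in names:
--         if not result or result[-1] != n:
--             result.append(n)
--     return result
-- ===== Notes on version B (the rewrite author's own statement) =====
-- stated objective: alternative
-- what changed: Replaces the hash-set + order-preserving result list (dedup while scanning, then sort) by a keep-duplicates filter pass, a sort, and a single adjacent-neighbour dedup walk; no membership structure is maintained.
import Mathlib
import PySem

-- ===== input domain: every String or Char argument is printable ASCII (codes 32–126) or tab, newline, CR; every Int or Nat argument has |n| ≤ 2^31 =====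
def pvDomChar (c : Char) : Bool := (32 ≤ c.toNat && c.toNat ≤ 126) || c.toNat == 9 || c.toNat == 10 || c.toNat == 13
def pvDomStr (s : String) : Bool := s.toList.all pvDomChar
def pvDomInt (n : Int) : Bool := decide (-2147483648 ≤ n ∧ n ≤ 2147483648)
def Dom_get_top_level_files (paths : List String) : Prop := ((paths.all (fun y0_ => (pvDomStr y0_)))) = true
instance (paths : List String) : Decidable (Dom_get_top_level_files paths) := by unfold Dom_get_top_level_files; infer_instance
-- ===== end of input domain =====

-- B replaces A's hash-set + insertion-order dedup (then sort) by filter, sort, and one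
-- adjacent-neighbour dedup walk: a genuinely different decomposition of the same task.

-- shared helper: both Pythons define the same normalize_path
def normalize_path (path : String) : String :=
  let p := PySem.Str.strip path
  if PySem.Str.startswith p "./" then PySem.Str.slice p (some 2) none else p

-- ===== PORT A =====
-- A's loop body: normalize, skip empty or nested, then set-guarded append
def stepA (st : PySem.Set String × List String) (p : String) : PySem.Set String × List String :=
  let n := normalize_path p
  if decide (n = "") || PySem.Str.isIn "/" n then st
  else if PySem.Set.contains st.1 n then st
  else (PySem.Set.add st.1 n, st.2 ++ [n])

def get_top_level_files (paths : List String) : List String :=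
  let st := paths.foldl stepA (PySem.Set.empty, [])
  PySem.List.sorted st.2 (fun x => x) false

-- ===== PORT B =====
-- B's filter predicate: `if n and "/" not in n`
def pvKeep (n : String) : Bool := !decide (n = "") && !PySem.Str.isIn "/" n

def get_top_level_files_alt (paths : List String) : List String :=
  let names := (paths.map normalize_path).filter pvKeep
  let sortedNames := PySem.List.sorted names (fun x => x) false
  sortedNames.foldl (fun acc n => if acc.getLast? = some n then acc else acc ++ [n]) []

-- ===== PRECONDITION & SPEC =====
def Spec_get_top_level_files (paths : List String) (out : List String) : Prop := out = get_top_level_files_alt paths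
instance (paths : List String) (out : List String) : Decidable (Spec_get_top_level_files paths out) := by unfold Spec_get_top_level_files; infer_instance

-- ===== CLAIM (what is proved, stated in full; the proofs are below) =====
def Claim_equal_get_top_level_files : Prop := ∀ (paths : List String), Dom_get_top_level_files paths → Spec_get_top_level_files paths (get_top_level_files paths)

-- ===== LEMMAS AND PROOFS =====

-- adjacent-dedup, recursively: what B's foldl computes (pvDD_foldl below)
def pvDD : Option String → List String → List String
  | _, [] => []
  | last, x :: xs => if last = some x then pvDD last xs else x :: pvDD (some x) xs

lemma pvDD_cons_eq (x : String) (xs : List String) :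
    pvDD (some x) (x :: xs) = pvDD (some x) xs := by simp [pvDD]

lemma pvDD_cons_ne (a? : Option String) (x : String) (xs : List String) (h : a? ≠ some x) :
    pvDD a? (x :: xs) = x :: pvDD (some x) xs := by simp [pvDD, h]

lemma pvDD_foldl : ∀ (xs acc : List String),
    xs.foldl (fun acc n => if acc.getLast? = some n then acc else acc ++ [n]) acc
      = acc ++ pvDD acc.getLast? xs := by
  intro xs
  induction xs with
  | nil => intro acc; simp [pvDD]
  | cons x xs ih =>
    intro acc
    by_cases h : acc.getLast? = some x
    · rw [List.foldl_cons, if_pos h, ih, h, pvDD_cons_eq]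
    · rw [List.foldl_cons, if_neg h, ih, pvDD_cons_ne _ _ _ h]
      simp

lemma pvDD_spec : ∀ (xs : List String) (a? : Option String),
    xs.Pairwise (· ≤ ·) → (∀ a ∈ a?, ∀ x ∈ xs, a ≤ x) →
    (pvDD a? xs).Pairwise (· < ·) ∧ ∀ y, (y ∈ pvDD a? xs ↔ y ∈ xs ∧ a? ≠ some y) := by
  intro xs
  induction xs with
  | nil => intro a? _ _; simp [pvDD]
  | cons x xs ih =>
    intro a? hp hle
    obtain ⟨hx, hp'⟩ := List.pairwise_cons.mp hp
    have hle' : ∀ a ∈ (some x : Option String), ∀ z ∈ xs, a ≤ z := by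
      intro a ha z hz
      rw [Option.mem_def] at ha
      obtain rfl := Option.some.inj ha
      exact hx z hz
    obtain ⟨h1, h2⟩ := ih (some x) hp' hle'
    by_cases h : a? = some x
    · subst h
      rw [pvDD_cons_eq]
      refine ⟨h1, fun y => ?_⟩
      rw [h2 y]
      simp only [List.mem_cons]
      constructor
      · rintro ⟨hy, hne⟩; exact ⟨Or.inr hy, hne⟩
      · rintro ⟨(rfl | hy), hne⟩
        · exact (hne rfl).elim
        · exact ⟨hy, hne⟩
    · rw [pvDD_cons_ne _ _ _ h]
      refine ⟨?_, fun y => ?_⟩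
      · refine List.pairwise_cons.mpr ⟨?_, h1⟩
        intro y hy
        obtain ⟨hy', hne⟩ := (h2 y).mp hy
        exact lt_of_le_of_ne (hx y hy') (fun he => hne (by rw [he]))
      · simp only [List.mem_cons, h2 y]
        constructor
        · rintro (rfl | ⟨hy, hne⟩)
          · exact ⟨Or.inl rfl, fun hc => h hc⟩
          · refine ⟨Or.inr hy, fun hc => ?_⟩
            have hyx : y ≤ x := hle y (Option.mem_def.mpr hc) x List.mem_cons_self
            exact hne (congrArg some (le_antisymm (hx y hy) hyx))
        · rintro ⟨(rfl | hy), hne⟩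
          · exact Or.inl rfl
          · by_cases hyx : y = x
            · exact Or.inl hyx
            · exact Or.inr ⟨hy, fun hc => hyx (Option.some.inj hc).symm⟩

-- A's loop: both accumulator components stay equal, and equal to the Set.add-fold of the filtered names
lemma pvFoldA : ∀ (paths : List String) (s : PySem.Set String),
    paths.foldl stepA (s, s)
      = (((paths.map normalize_path).filter pvKeep).foldl PySem.Set.add s,
         ((paths.map normalize_path).filter pvKeep).foldl PySem.Set.add s) := by
  intro paths
  induction paths with
  | nil => intro s; rfl
  | cons p paths ih =>
    intro s
    rw [List.foldl_cons, List.map_cons, List.filter_cons]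
    by_cases hc : (decide (normalize_path p = "") || PySem.Str.isIn "/" (normalize_path p)) = true
    · have hk : pvKeep (normalize_path p) = false := by
        unfold pvKeep
        cases h1 : decide (normalize_path p = "") <;>
          cases h2 : PySem.Str.isIn "/" (normalize_path p) <;> simp_all
      have hstep : stepA (s, s) p = (s, s) := by simp only [stepA]; rw [if_pos hc]
      rw [hstep, hk, if_neg (by simp)]
      exact ih s
    · have hk : pvKeep (normalize_path p) = true := by
        unfold pvKeep
        cases h1 : decide (normalize_path p = "") <;>
          cases h2 : PySem.Str.isIn "/" (normalize_path p) <;> simp_all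
      have hstep : stepA (s, s) p
          = (PySem.Set.add s (normalize_path p), PySem.Set.add s (normalize_path p)) := by
        simp only [stepA]
        rw [if_neg hc]
        by_cases hm : PySem.Set.contains s (normalize_path p) = true
        · rw [if_pos hm, PySem.Set.add_of_mem (List.mem_of_elem_eq_true hm)]
        · rw [if_neg hm,
            PySem.Set.add_of_not_mem (fun hmem => hm (List.elem_eq_true_of_mem hmem))]
      rw [hstep, hk, if_pos rfl, List.foldl_cons]
      exact ih (PySem.Set.add s (normalize_path p))

-- ===== VERDICT (by name: the statement is the Claim_ definition above) =====
theorem get_top_level_files_spec : Claim_equal_get_top_level_files := by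
  intro paths _
  unfold Spec_get_top_level_files get_top_level_files get_top_level_files_alt
  dsimp only
  have hA := pvFoldA paths PySem.Set.empty
  simp only [PySem.Set.empty] at hA
  simp only [PySem.Set.empty]
  rw [hA]
  set F := (paths.map normalize_path).filter pvKeep with hF
  have hofl : F.foldl PySem.Set.add ([] : PySem.Set String) = PySem.Set.ofList F :=
    (PySem.Set.ofList_eq_foldl F).symm
  simp only [hofl]
  rw [pvDD_foldl]
  simp only [List.nil_append, List.getLast?_nil]
  have hsp : (PySem.List.sorted F (fun x => x) false).Pairwise (· ≤ ·) := by
    have := PySem.List.sorted_pairwise (xs := F) (key := fun x => x)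
    simpa using this
  obtain ⟨hlt, hmem⟩ := pvDD_spec (PySem.List.sorted F (fun x => x) false) none hsp
    (by intro a ha; cases ha)
  apply PySem.List.sorted_eq_of_perm_of_pairwise_lt
  · have hnd : (pvDD none (PySem.List.sorted F (fun x => x) false)).Nodup :=
      List.Pairwise.imp (fun h => ne_of_lt h) hlt
    rw [List.perm_ext_iff_of_nodup hnd (PySem.Set.nodup_ofList F)]
    intro y
    rw [hmem y, PySem.Set.mem_ofList, PySem.List.mem_sorted]
    simp
  · simpa using hlt
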